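-- pv_equiv track=rewrite | github.com/yyyyyt123/dynamic-moe-deepspeed | utils/groups.py | _get_expert_parallel_ranks
-- ===== SOURCE A (Python) =====
-- def _ensure_divisibility(numerator, denominator):
--     """Ensure that numerator is divisible by the denominator."""
--     assert numerator % denominator == 0, '{} is not divisible by {}'.format(
--         numerator, denominator)
--
-- def _get_expert_parallel_ranks(world_size, model_parallel_size_, expert_parallel_size_):
--     """Generate expert parallel and expert data parallel group ranks list.
--
--         Example - E + M + D parallel
--         world_size = 16
--         model_degree = 2
--         expert_degree = 4 # number of experts in same group
--         mp_group = [0, 1], [2,3], [4,5] ...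
--         data_parallel_group =[0,2,4,6,8,10, 12,14],                 [1,3,5,7,9,11,13,15]
--         expert_parallel_group = [0,2,4,6], [8,10,12,14]             [1,3,5,7], [9,11,13,15]
--         expert_data_parallel_group = [0,8],[2,10],[4,12],[6,14],    [1,9],[3,11],[5,13],[7,15]
--
--     Args:
--         world_size (int): Distributed world size.
--         model_parallel_size_ (int): Model parallel group size.
--         expert_parallel_size_ (int): Expert parallel group size.
--
--     Returns:
--         Expert parallel group ranks and Expert data parallel group ranks list.
--     """
--     _ensure_divisibility(world_size, model_parallel_size_)
--     dp_world_size = world_size // model_parallel_size_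
--     _ensure_divisibility(dp_world_size, expert_parallel_size_)
--
--     # Generate data parallel groups
--     data_parallel_groups = []
--     dp_group_size = model_parallel_size_
--     for i in range(dp_group_size):
--         data_parallel_groups.append(list(range(i, world_size, dp_group_size)))
--
--     expert_parallel_groups = []
--     expert_data_parallel_groups = []
--     for dp_ranks in data_parallel_groups:
--         # partition of expert parallel groups, e.g. [0,2,4,6], [8,10,12,14]
--         part_ep_groups = []
--         for i in range(0, dp_world_size, expert_parallel_size_):
--             part_ep_groups.append(dp_ranks[i:i + expert_parallel_size_])
--         expert_parallel_groups.extend(part_ep_groups)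
--
--         # zip part_ep_groups get expert data parallel ranks, e.g [0,8],[2,10],[4,12],[6,14]
--         for expert_dp_ranks in zip(*part_ep_groups):
--             expert_data_parallel_groups.append(list(expert_dp_ranks))
--
--     return expert_parallel_groups, expert_data_parallel_groups
-- ===== SOURCE B (Python) =====
-- def _ensure_divisibility(numerator, denominator):
--     """Ensure that numerator is divisible by the denominator."""
--     assert numerator % denominator == 0, '{} is not divisible by {}'.format(
--         numerator, denominator)
--
-- def _get_expert_parallel_ranks(world_size, model_parallel_size_, expert_parallel_size_):
--     """Closed-form version: rank = i + model_parallel_size_*(j*expert_parallel_size_+k)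
--     for model-parallel index i, chunk j and in-chunk position k; emit the two group
--     lists directly, without the data-parallel table, slicing or zip."""
--     _ensure_divisibility(world_size, model_parallel_size_)
--     dp_world_size = world_size // model_parallel_size_
--     _ensure_divisibility(dp_world_size, expert_parallel_size_)
--     num_chunks = dp_world_size // expert_parallel_size_
--
--     expert_parallel_groups = [
--         [i + model_parallel_size_ * (j * expert_parallel_size_ + k)
--          for k in range(expert_parallel_size_)]
--         for i in range(model_parallel_size_)
--         for j in range(num_chunks)]
--     expert_data_parallel_groups = [
--         [i + model_parallel_size_ * (j * expert_parallel_size_ + k)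
--          for j in range(num_chunks)]
--         for i in range(model_parallel_size_)
--         for k in range(expert_parallel_size_)]
--     return expert_parallel_groups, expert_data_parallel_groups
-- ===== Notes on version B (the rewrite author's own statement) =====
-- stated objective: simpler
-- what changed: B emits both group lists directly from the closed-form rank formula i + model_parallel_size_*(j*expert_parallel_size_+k), dropping A's intermediate data-parallel table, slicing and zip-transpose.
-- outside the precondition, e.g. on _get_expert_parallel_ranks(0, 1, 1): A returns ([], []), B returns ([], [[]]); on _get_expert_parallel_ranks(-12, 2, 2): A returns ([], []), B returns ([], [[], [], [], []])
import Mathlib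
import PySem

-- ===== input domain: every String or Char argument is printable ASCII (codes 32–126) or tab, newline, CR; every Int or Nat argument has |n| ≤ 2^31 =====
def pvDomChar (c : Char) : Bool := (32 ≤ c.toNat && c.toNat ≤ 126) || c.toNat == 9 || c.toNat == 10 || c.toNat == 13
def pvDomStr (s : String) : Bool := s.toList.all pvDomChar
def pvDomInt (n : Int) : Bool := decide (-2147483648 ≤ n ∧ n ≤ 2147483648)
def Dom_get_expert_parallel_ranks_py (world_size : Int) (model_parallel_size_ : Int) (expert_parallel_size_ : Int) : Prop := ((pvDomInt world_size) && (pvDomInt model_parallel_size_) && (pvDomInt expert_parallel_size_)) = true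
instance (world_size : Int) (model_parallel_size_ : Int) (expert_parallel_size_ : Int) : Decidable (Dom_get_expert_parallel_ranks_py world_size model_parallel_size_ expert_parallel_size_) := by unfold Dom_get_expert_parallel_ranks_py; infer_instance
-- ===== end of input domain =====

-- ===== PORT A =====
-- B replaces A's data-parallel table + slicing + zip-transpose by the closed-form rank formula (objective: simpler); return-value equivalence proved on Pre_.
-- Helper for A's `zip(*part_ep_groups)`: Python zip of several lists (truncates at the shortest; zero lists give []).
def pyZipStarA : List (List Int) → List (List Int)
  | [] => []
  | x :: rest =>
    if x.isEmpty || rest.any (fun l => l.isEmpty) then []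
    else (x.headD 0 :: rest.map (fun l => l.headD 0)) :: pyZipStarA (x.tail :: rest.map (fun l => l.tail))
termination_by xss => (xss.headD []).length
decreasing_by
  simp only [List.headD_cons]
  cases x with
  | nil => simp at *
  | cons a t => simp

def get_expert_parallel_ranks_py (world_size : Int) (model_parallel_size_ : Int) (expert_parallel_size_ : Int) : List (List Int) × List (List Int) :=
  -- both `_ensure_divisibility` asserts pass on Pre_ (they are the divisibility conjuncts there)
  let dp_world_size := PySem.Int.floordiv world_size model_parallel_size_
  let dp_group_size := model_parallel_size_
  let data_parallel_groups : List (List Int) :=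
    (PySem.List.pyRange 0 dp_group_size 1).foldl
      (fun acc i => acc ++ [PySem.List.pyRange i world_size dp_group_size]) []
  let st :=
    data_parallel_groups.foldl
      (fun (st : List (List Int) × List (List Int)) dp_ranks =>
        let part_ep_groups : List (List Int) :=
          (PySem.List.pyRange 0 dp_world_size expert_parallel_size_).foldl
            (fun acc i => acc ++ [PySem.List.slice dp_ranks (some i) (some (i + expert_parallel_size_))]) []
        ( st.1 ++ part_ep_groups,
          (pyZipStarA part_ep_groups).foldl (fun acc expert_dp_ranks => acc ++ [expert_dp_ranks]) st.2 ))
      ([], [])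
  (st.1, st.2)

-- ===== PORT B =====
def get_expert_parallel_ranks_py_alt (world_size : Int) (model_parallel_size_ : Int) (expert_parallel_size_ : Int) : List (List Int) × List (List Int) :=
  let dp_world_size := PySem.Int.floordiv world_size model_parallel_size_
  let num_chunks := PySem.Int.floordiv dp_world_size expert_parallel_size_
  let expert_parallel_groups : List (List Int) :=
    (PySem.List.pyRange 0 model_parallel_size_ 1).flatMap (fun i =>
      (PySem.List.pyRange 0 num_chunks 1).map (fun j =>
        (PySem.List.pyRange 0 expert_parallel_size_ 1).map (fun k =>
          i + model_parallel_size_ * (j * expert_parallel_size_ + k))))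
  let expert_data_parallel_groups : List (List Int) :=
    (PySem.List.pyRange 0 model_parallel_size_ 1).flatMap (fun i =>
      (PySem.List.pyRange 0 expert_parallel_size_ 1).map (fun k =>
        (PySem.List.pyRange 0 num_chunks 1).map (fun j =>
          i + model_parallel_size_ * (j * expert_parallel_size_ + k))))
  (expert_parallel_groups, expert_data_parallel_groups)

-- ===== PRECONDITION & SPEC =====
-- Besides A's two raising conditions (ZeroDivisionError on a zero size, AssertionError on a failed
-- divisibility check), Pre_ excludes the degenerate corner world_size ≤ 0 with both parallel sizes
-- positive, where A's empty output and B's list of empty groups are both accidental artefacts of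
-- empty ranges and neither value would be specified.
def Pre_get_expert_parallel_ranks_py (world_size : Int) (model_parallel_size_ : Int) (expert_parallel_size_ : Int) : Prop :=
  model_parallel_size_ ≠ 0 ∧ expert_parallel_size_ ≠ 0 ∧
  PySem.Int.mod world_size model_parallel_size_ = 0 ∧
  PySem.Int.mod (PySem.Int.floordiv world_size model_parallel_size_) expert_parallel_size_ = 0 ∧
  ¬ (world_size ≤ 0 ∧ 0 < model_parallel_size_ ∧ 0 < expert_parallel_size_)
instance (world_size : Int) (model_parallel_size_ : Int) (expert_parallel_size_ : Int) : Decidable (Pre_get_expert_parallel_ranks_py world_size model_parallel_size_ expert_parallel_size_) := by unfold Pre_get_expert_parallel_ranks_py; infer_instance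

def pvWitness_get_expert_parallel_ranks_py : Int × Int × Int := (16, 2, 4)

def Spec_get_expert_parallel_ranks_py (world_size : Int) (model_parallel_size_ : Int) (expert_parallel_size_ : Int) (out : List (List Int) × List (List Int)) : Prop := out = get_expert_parallel_ranks_py_alt world_size model_parallel_size_ expert_parallel_size_
instance (world_size : Int) (model_parallel_size_ : Int) (expert_parallel_size_ : Int) (out : List (List Int) × List (List Int)) : Decidable (Spec_get_expert_parallel_ranks_py world_size model_parallel_size_ expert_parallel_size_ out) := by unfold Spec_get_expert_parallel_ranks_py; infer_instance

-- ===== CLAIM (what is proved, stated in full; the proofs are below) =====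
def Claim_equal_get_expert_parallel_ranks_py : Prop := ∀ (world_size : Int) (model_parallel_size_ : Int) (expert_parallel_size_ : Int), Dom_get_expert_parallel_ranks_py world_size model_parallel_size_ expert_parallel_size_ → Pre_get_expert_parallel_ranks_py world_size model_parallel_size_ expert_parallel_size_ → Spec_get_expert_parallel_ranks_py world_size model_parallel_size_ expert_parallel_size_ (get_expert_parallel_ranks_py world_size model_parallel_size_ expert_parallel_size_)

-- ===== LEMMAS AND PROOFS =====

lemma foldl_map_singleton {a b : Type} (xs : List a) (h : a → b) (init : List b) :
    xs.foldl (fun acc i => acc ++ [h i]) init = init ++ xs.map h := by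
  induction xs generalizing init with
  | nil => simp
  | cons x t ih => simp [List.foldl_cons, ih, List.append_assoc]

lemma foldl_pair_append {g : Type} (xs : List g) (f h : g → List (List Int)) (p : List (List Int) × List (List Int)) :
    xs.foldl (fun st x => (st.1 ++ f x, st.2 ++ h x)) p
      = (p.1 ++ xs.flatMap f, p.2 ++ xs.flatMap h) := by
  induction xs generalizing p with
  | nil => simp
  | cons x t ih =>
    simp only [List.foldl_cons]
    rw [ih]
    simp [List.append_assoc]

lemma zipStar_map {a : Type} (l : List a) (hl : l ≠ []) (e : Nat) (g : a → Nat → Int) :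
    pyZipStarA (l.map (fun j => (List.range e).map (g j)))
      = (List.range e).map (fun k => l.map (fun j => g j k)) := by
  induction e generalizing g with
  | zero =>
    cases l with
    | nil => exact absurd rfl hl
    | cons a0 l' => simp [pyZipStarA]
  | succ e ih =>
    cases l with
    | nil => exact absurd rfl hl
    | cons a0 l' =>
      have harg : (a0 :: l').map (fun j => (List.range (e+1)).map (g j))
          = ((g a0 0 :: (List.range e).map (fun k => g a0 (k+1))) ::
             l'.map (fun j => g j 0 :: (List.range e).map (fun k => g j (k+1)))) := by
        simp [List.range_succ_eq_map, List.map_map, Function.comp_def]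
      rw [harg, pyZipStarA]
      have hcond : (((g a0 0 :: (List.range e).map (fun k => g a0 (k+1)))).isEmpty
          || (l'.map (fun j => g j 0 :: (List.range e).map (fun k => g j (k+1)))).any
               (fun l => l.isEmpty)) = false := by
        simp [List.any_map, Function.comp_def]
      rw [if_neg (by simp)]
      have htail : ((List.range e).map (fun k => g a0 (k+1)) ::
            (l'.map (fun j => g j 0 :: (List.range e).map (fun k => g j (k+1)))).map (fun l => l.tail))
          = (a0 :: l').map (fun j => (List.range e).map (fun k => g j (k+1))) := by
        simp [List.map_map, Function.comp_def]
      simp only [List.headD_cons, List.tail_cons, List.map_map]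
      have := ih (fun j k => g j (k+1))
      simp only [List.map_map, Function.comp_def] at this htail ⊢
      rw [htail, this]
      simp [List.range_succ_eq_map, List.map_map, Function.comp_def]

lemma pyRange_div (dp e : Int) (he : e ≠ 0) (hd : e ∣ dp) :
    PySem.List.pyRange 0 dp e
      = (List.range (PySem.Int.floordiv dp e).toNat).map (fun j : Nat => (0 : Int) + e * (j : Int)) := by
  obtain ⟨q, rfl⟩ := hd
  have hq : PySem.Int.floordiv (e * q) e = q := by
    rcases lt_or_gt_of_ne he with hneg | hpos
    · have h1 := PySem.Int.floordiv_neg_neg (e * q) e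
      have h2 : -(e * q) = (-e) * q := by ring
      rw [h2] at h1
      rw [← h1, PySem.Int.floordiv_eq_ediv_of_pos (by omega : (0:Int) < -e)]
      exact Int.mul_ediv_cancel_left q (by omega)
    · rw [PySem.Int.floordiv_eq_ediv_of_pos hpos]
      exact Int.mul_ediv_cancel_left q (by omega)
  rw [hq]
  suffices h : (if 0 < e then (if (0:Int) < e*q then ((e*q - 0 + e - 1)/e).toNat else 0)
      else (if e*q < 0 then ((0 - e*q + -e - 1)/(-e)).toNat else 0)) = q.toNat by
    simp only [PySem.List.pyRange, if_neg he]
    rw [h]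
  rcases lt_or_gt_of_ne he with hneg | hpos
  · rw [if_neg (by omega : ¬ (0:Int) < e)]
    by_cases hlt : e * q < 0
    · have hq0 : 0 < q := by nlinarith
      rw [if_pos hlt]
      have harith : 0 - e * q + -e - 1 = (-e - 1) + q * (-e) := by ring
      rw [harith, Int.add_mul_ediv_right _ _ (by omega : (-e) ≠ 0),
        Int.ediv_eq_zero_of_lt (by omega) (by omega)]
      omega
    · have hq0 : q ≤ 0 := by nlinarith
      rw [if_neg hlt]
      omega
  · rw [if_pos hpos]
    by_cases hlt : (0:Int) < e * q
    · have hq0 : 0 < q := by nlinarith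
      rw [if_pos hlt]
      have harith : e * q - 0 + e - 1 = (e - 1) + q * e := by ring
      rw [harith, Int.add_mul_ediv_right _ _ (by omega : e ≠ 0),
        Int.ediv_eq_zero_of_lt (by omega) (by omega)]
      omega
    · have hq0 : q ≤ 0 := by nlinarith
      rw [if_neg hlt]
      omega


lemma floordiv_mul_cancel (e q : Int) (he : e ≠ 0) : PySem.Int.floordiv (e * q) e = q := by
  rcases lt_or_gt_of_ne he with hneg | hpos
  · have h1 := PySem.Int.floordiv_neg_neg (e * q) e
    have h2 : -(e * q) = (-e) * q := by ring
    rw [h2] at h1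
    rw [← h1, PySem.Int.floordiv_eq_ediv_of_pos (by omega : (0:Int) < -e)]
    exact Int.mul_ediv_cancel_left q (by omega)
  · rw [PySem.Int.floordiv_eq_ediv_of_pos hpos]
    exact Int.mul_ediv_cancel_left q (by omega)

lemma take_drop_range (E NC j : Nat) (hj : j < NC) :
    ((List.range (E*NC)).drop (E*j)).take E = List.range' (E*j) E := by
  rw [List.range_eq_range', List.drop_range']
  have hle : E*j + E ≤ E*NC := by
    have := Nat.mul_le_mul_left E hj
    nlinarith
  have h : E*NC - E*j = E + (E*NC - (E*j + E)) := by omega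
  rw [h, ← List.range'_append]
  rw [List.take_append_of_le_length (by simp)]
  simp

lemma dpranks_char (w m i dpq : Int) (hm : 0 < m) (hdq : 0 < dpq) (hw : w = m * dpq)
    (hi0 : 0 ≤ i) (him : i < m) :
    PySem.List.pyRange i w m = (List.range dpq.toNat).map (fun t : Nat => i + m * (t : Int)) := by
  rw [PySem.List.pyRange_of_pos _ _ hm]
  have hiw : i < w := by nlinarith
  rw [if_pos hiw]
  have harith : (w - i + m - 1) = (m - 1 - i) + dpq * m := by rw [hw]; ring
  rw [harith, Int.add_mul_ediv_right _ _ hm.ne', Int.ediv_eq_zero_of_lt (by omega) (by omega)]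
  norm_num

lemma partA_char (w m e i dpq ncq : Int) (hm : 0 < m) (he : 0 < e) (hdq : 0 < dpq) (hnq : 0 < ncq)
    (hw : w = m * dpq) (hdp : dpq = e * ncq) (hi0 : 0 ≤ i) (him : i < m) :
    (PySem.List.pyRange 0 dpq e).map
        (fun a => PySem.List.slice (PySem.List.pyRange i w m) (some a) (some (a + e)))
      = (List.range ncq.toNat).map (fun j : Nat =>
          (List.range e.toNat).map (fun k : Nat => i + m * ((j : Int) * e + (k : Int)))) := by
  rw [pyRange_div dpq e he.ne' ⟨ncq, hdp⟩, hdp, floordiv_mul_cancel e ncq he.ne']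
  rw [dpranks_char w m i dpq hm hdq hw hi0 him]
  rw [List.map_map]
  apply List.map_congr_left
  intro j hj
  have hjlt : j < ncq.toNat := List.mem_range.1 hj
  have heE : ((e.toNat : Int)) = e := Int.toNat_of_nonneg he.le
  have hnN : ((ncq.toNat : Int)) = ncq := Int.toNat_of_nonneg hnq.le
  have hD : dpq.toNat = e.toNat * ncq.toNat := by
    have hcast : ((e.toNat * ncq.toNat : Nat) : Int) = dpq := by push_cast [heE, hnN]; omega
    omega
  simp only [Function.comp_apply]
  have hb1 : (0:Int) + e * (j:Int) = ((e.toNat * j : Nat) : Int) := by push_cast [heE]; ring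
  have hb2 : (0:Int) + e * (j:Int) + e = ((e.toNat * j : Nat) : Int) + ((e.toNat : Nat) : Int) := by
    push_cast [heE]; ring
  rw [hb2, hb1, PySem.List.slice_natCast_add]
  rw [hD, ← List.map_drop, ← List.map_take, take_drop_range e.toNat ncq.toNat j hjlt]
  rw [List.range'_eq_map_range, List.map_map]
  apply List.map_congr_left
  intro k hk
  simp only [Function.comp_apply]
  push_cast [heE]
  ring

lemma pyRange_pos_nil (a b s : Int) (hs : 0 < s) (hba : b ≤ a) :
    PySem.List.pyRange a b s = [] := by
  rw [PySem.List.pyRange_of_pos _ _ hs, if_neg (by omega)]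
  simp

-- ===== VERDICT (by name: the statement is the Claim_ definition above) =====
theorem get_expert_parallel_ranks_py_spec : Claim_equal_get_expert_parallel_ranks_py := by
  intro w m e hdom hpre
  obtain ⟨hm0, he0, hmod1, hmod2, hcorner⟩ := hpre
  unfold Spec_get_expert_parallel_ranks_py
  rcases lt_trichotomy m 0 with hm | hm | hm
  · -- m < 0 : both loops run over range(m) = []
    simp [get_expert_parallel_ranks_py, get_expert_parallel_ranks_py_alt,
      PySem.List.pyRange_one_eq_nil hm.le]
  · exact absurd hm hm0
  · -- m > 0
    obtain ⟨dpq, hw⟩ : m ∣ w := (PySem.Int.mod_eq_zero_iff_dvd _ _).1 hmod1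
    have hdp_eq : PySem.Int.floordiv w m = dpq := by
      rw [hw]; exact floordiv_mul_cancel m dpq hm.ne'
    have hedvd : e ∣ dpq := by
      rw [← hdp_eq]; exact (PySem.Int.mod_eq_zero_iff_dvd _ _).1 hmod2
    obtain ⟨ncq, hdpnc⟩ := hedvd
    have hnc_eq : PySem.Int.floordiv dpq e = ncq := by
      rw [hdpnc]; exact floordiv_mul_cancel e ncq he0
    simp only [get_expert_parallel_ranks_py, get_expert_parallel_ranks_py_alt, hdp_eq, hnc_eq,
      foldl_map_singleton, List.nil_append]
    rw [foldl_pair_append]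
    simp only [List.flatMap_map, List.nil_append, List.map_id']
    rcases lt_trichotomy e 0 with he | he | he
    · -- e < 0
      rcases le_or_gt 0 dpq with hdq | hdq
      · -- dp_world_size ≥ 0 : all four lists are empty
        have hnq : ncq ≤ 0 := by nlinarith
        have h1 : PySem.List.pyRange 0 dpq e = [] := by
          rw [pyRange_div dpq e he0 ⟨ncq, hdpnc⟩, hdpnc, floordiv_mul_cancel e ncq he0]
          simp [Int.toNat_of_nonpos hnq]
        have h2 : PySem.List.pyRange 0 ncq 1 = [] := PySem.List.pyRange_one_eq_nil hnq
        have h3 : PySem.List.pyRange 0 e 1 = [] := PySem.List.pyRange_one_eq_nil he.le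
        simp [h1, h2, h3, pyZipStarA]
      · -- dp_world_size < 0 : chunks of the empty data-parallel lists
        have hnq : 0 < ncq := by nlinarith
        have hwneg : w < 0 := by nlinarith
        have h1 : PySem.List.pyRange 0 dpq e
            = (List.range ncq.toNat).map (fun j : Nat => (0:Int) + e * (j:Int)) := by
          rw [pyRange_div dpq e he0 ⟨ncq, hdpnc⟩, hdpnc, floordiv_mul_cancel e ncq he0]
        have h3 : PySem.List.pyRange 0 e 1 = [] := PySem.List.pyRange_one_eq_nil he.le
        have hne : List.range ncq.toNat ≠ [] := by
          simp [List.range_eq_nil]; omega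
        simp only [Prod.mk.injEq]
        constructor
        · apply List.flatMap_congr
          intro i hi
          obtain ⟨hi0, him⟩ := PySem.List.mem_pyRange_one.1 hi
          rw [pyRange_pos_nil i w m hm (by omega), h1, PySem.List.pyRange_one 0 ncq,
            List.map_map, List.map_map]
          simp only [sub_zero]
          apply List.map_congr_left
          intro j hj
          simp [PySem.List.slice, h3]
        · apply List.flatMap_congr
          intro i hi
          obtain ⟨hi0, him⟩ := PySem.List.mem_pyRange_one.1 hi
          rw [pyRange_pos_nil i w m hm (by omega), h1, List.map_map]
          have hconst : (List.range ncq.toNat).map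
                ((fun a => PySem.List.slice ([] : List Int) (some a) (some (a+e)))
                  ∘ (fun j : Nat => (0:Int) + e * (j:Int)))
              = (List.range ncq.toNat).map (fun _ => ([] : List Int)) := by
            apply List.map_congr_left
            intro j hj
            simp [PySem.List.slice]
          rw [hconst]
          have hzip : pyZipStarA ((List.range ncq.toNat).map (fun _ => ([] : List Int))) = [] := by
            have := zipStar_map (List.range ncq.toNat) hne 0 (fun _ _ => (0:Int))
            simpa using this
          rw [hzip, h3]
          simp
    · exact absurd he he0
    · -- e > 0, hence w > 0 by Pre_
      have hwpos : 0 < w := by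
        by_contra hw0
        push Not at hw0
        exact hcorner ⟨hw0, hm, he⟩
      have hdq : 0 < dpq := by
        by_contra h
        push Not at h
        nlinarith
      have hnq : 0 < ncq := by
        by_contra h
        push Not at h
        nlinarith
      have hne : List.range ncq.toNat ≠ [] := by
        simp [List.range_eq_nil]; omega
      simp only [Prod.mk.injEq]
      constructor
      · apply List.flatMap_congr
        intro i hi
        obtain ⟨hi0, him⟩ := PySem.List.mem_pyRange_one.1 hi
        rw [partA_char w m e i dpq ncq hm he hdq hnq hw hdpnc hi0 him]
        rw [PySem.List.pyRange_one 0 ncq, PySem.List.pyRange_one 0 e, List.map_map]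
        simp only [sub_zero]
        apply List.map_congr_left
        intro j hj
        simp [Function.comp_def]
      · apply List.flatMap_congr
        intro i hi
        obtain ⟨hi0, him⟩ := PySem.List.mem_pyRange_one.1 hi
        rw [partA_char w m e i dpq ncq hm he hdq hnq hw hdpnc hi0 him]
        rw [zipStar_map (List.range ncq.toNat) hne e.toNat
          (fun j k => i + m * ((j : Int) * e + (k : Int)))]
        rw [PySem.List.pyRange_one 0 ncq, PySem.List.pyRange_one 0 e, List.map_map]
        simp only [sub_zero]
        apply List.map_congr_left
        intro k hk
        simp [Function.comp_def]
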